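-- pv_equiv track=rewrite | github.com/AhmadIbrahim23/checker-mlbb | api/index.py | get_rank_name
-- ===== SOURCE A (Python) =====
-- RANK_RANGES = [
--     {"min": 0, "max": 4, "rank": "Warrior III"},
--     {"min": 5, "max": 9, "rank": "Warrior II"},
--     {"min": 10, "max": 14, "rank": "Warrior I"},
--     {"min": 15, "max": 19, "rank": "Elite IV"},
--     {"min": 20, "max": 24, "rank": "Elite III"},
--     {"min": 25, "max": 29, "rank": "Elite II"},
--     {"min": 30, "max": 34, "rank": "Elite I"},
--     {"min": 35, "max": 39, "rank": "Master IV"},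
--     {"min": 40, "max": 44, "rank": "Master III"},
--     {"min": 45, "max": 49, "rank": "Master II"},
--     {"min": 50, "max": 54, "rank": "Master I"},
--     {"min": 55, "max": 59, "rank": "Grandmaster IV"},
--     {"min": 60, "max": 64, "rank": "Grandmaster III"},
--     {"min": 65, "max": 69, "rank": "Grandmaster II"},
--     {"min": 70, "max": 74, "rank": "Grandmaster I"},
--     {"min": 75, "max": 79, "rank": "Epic IV"},
--     {"min": 80, "max": 84, "rank": "Epic III"},
--     {"min": 85, "max": 89, "rank": "Epic II"},
--     {"min": 90, "max": 94, "rank": "Epic I"},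
--     {"min": 95, "max": 99, "rank": "Legend IV"},
--     {"min": 100, "max": 104, "rank": "Legend III"},
--     {"min": 105, "max": 109, "rank": "Legend II"},
--     {"min": 110, "max": 114, "rank": "Legend I"},
--     {"min": 115, "max": 136, "rank": "Mythic Entry"},
--     {"min": 137, "max": 160, "rank": "Mythic"},
--     {"min": 161, "max": 185, "rank": "Mythic Honor"},
--     {"min": 186, "max": 235, "rank": "Mythical Glory"},
--     {"min": 236, "max": 9999, "rank": "Mythical Immortal"}
-- ]
--
-- def get_rank_name(rank_level):
--     try:
--         rank_level = int(rank_level)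
--         for rank in RANK_RANGES:
--             if rank["min"] <= rank_level <= rank["max"]:
--                 if rank["rank"] == "Mythic":
--                     star = rank_level - 136
--                     return f"Mythic {star} Star"
--                 elif rank["rank"] == "Mythic Honor":
--                     star = rank_level - 160
--                     return f"Mythic Honor {star + 24} Star"
--                 elif rank["rank"] == "Mythical Glory":
--                     star = rank_level - 185
--                     return f"Mythical Glory {star + 49} Star"
--                 elif rank["rank"] == "Mythical Immortal":
--                     star = rank_level - 235
--                     return f"Mythical Immortal {star + 99} Star"
--                 return rank["rank"]
--         return "Unranked"
--     except:
--         return "N/A"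
-- ===== SOURCE B (Python) =====
-- REGULAR_RANKS = [
--     "Warrior III", "Warrior II", "Warrior I",
--     "Elite IV", "Elite III", "Elite II", "Elite I",
--     "Master IV", "Master III", "Master II", "Master I",
--     "Grandmaster IV", "Grandmaster III", "Grandmaster II", "Grandmaster I",
--     "Epic IV", "Epic III", "Epic II", "Epic I",
--     "Legend IV", "Legend III", "Legend II", "Legend I",
-- ]
--
-- def get_rank_name(rank_level):
--     n = int(rank_level)
--     if n < 0 or n > 9999:
--         return "Unranked"
--     if n <= 114:
--         return REGULAR_RANKS[n // 5]
--     if n <= 136: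
--         return "Mythic Entry"
--     if n <= 160:
--         prefix = "Mythic"
--     elif n <= 185:
--         prefix = "Mythic Honor"
--     elif n <= 235:
--         prefix = "Mythical Glory"
--     else:
--         prefix = "Mythical Immortal"
--     return f"{prefix} {n - 136} Star"
-- ===== Notes on version B (the rewrite author's own statement) =====
-- stated objective: simpler
-- what changed: Replaces the linear scan over the rank-range records with a closed-form table lookup (REGULAR_RANKS[n // 5] for the regular levels) plus threshold branches for the Mythic tail, where all four star offsets collapse to n - 136.
import Mathlib
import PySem

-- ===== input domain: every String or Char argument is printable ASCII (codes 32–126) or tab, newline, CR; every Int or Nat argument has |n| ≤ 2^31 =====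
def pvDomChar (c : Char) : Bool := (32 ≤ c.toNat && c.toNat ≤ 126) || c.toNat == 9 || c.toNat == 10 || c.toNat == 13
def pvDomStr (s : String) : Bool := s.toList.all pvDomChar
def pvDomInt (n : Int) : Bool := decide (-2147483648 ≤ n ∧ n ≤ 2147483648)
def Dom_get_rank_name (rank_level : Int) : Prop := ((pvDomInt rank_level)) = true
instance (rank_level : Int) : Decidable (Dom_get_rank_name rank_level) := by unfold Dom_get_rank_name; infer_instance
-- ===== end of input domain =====

-- B replaces A's linear scan over 28 range records with a flat table indexed by n // 5 plus
-- threshold branches for the Mythic tail (all star offsets collapse to n - 136); objective: simpler.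

-- ===== PORT A =====
-- the 28 RANK_RANGES records as (min, max, rank)
def rankRanges : List (Int × Int × String) := [
  (0, 4, "Warrior III"), (5, 9, "Warrior II"), (10, 14, "Warrior I"),
  (15, 19, "Elite IV"), (20, 24, "Elite III"), (25, 29, "Elite II"), (30, 34, "Elite I"),
  (35, 39, "Master IV"), (40, 44, "Master III"), (45, 49, "Master II"), (50, 54, "Master I"),
  (55, 59, "Grandmaster IV"), (60, 64, "Grandmaster III"), (65, 69, "Grandmaster II"), (70, 74, "Grandmaster I"),
  (75, 79, "Epic IV"), (80, 84, "Epic III"), (85, 89, "Epic II"), (90, 94, "Epic I"),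
  (95, 99, "Legend IV"), (100, 104, "Legend III"), (105, 109, "Legend II"), (110, 114, "Legend I"),
  (115, 136, "Mythic Entry"), (137, 160, "Mythic"), (161, 185, "Mythic Honor"),
  (186, 235, "Mythical Glory"), (236, 9999, "Mythical Immortal")]

-- A's per-record branch on rank["rank"] (the body inside the matched range)
def rankLabel (n : Int) (r : String) : String :=
  if r = "Mythic" then "Mythic " ++ PySem.Int.toStr (n - 136) ++ " Star"
  else if r = "Mythic Honor" then "Mythic Honor " ++ PySem.Int.toStr ((n - 160) + 24) ++ " Star"
  else if r = "Mythical Glory" then "Mythical Glory " ++ PySem.Int.toStr ((n - 185) + 49) ++ " Star"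
  else if r = "Mythical Immortal" then "Mythical Immortal " ++ PySem.Int.toStr ((n - 235) + 99) ++ " Star"
  else r

-- A's for-loop over RANK_RANGES with the early returns, as a structural recursion
def findRank (n : Int) : List (Int × Int × String) → String
  | [] => "Unranked"
  | (lo, hi, r) :: rest =>
    if lo ≤ n ∧ n ≤ hi then rankLabel n r else findRank n rest

-- int(rank_level) on an int is the identity, so the try/except never fires
def get_rank_name (rank_level : Int) : String := findRank rank_level rankRanges

-- ===== PORT B =====
def regularRanks : List String := [
  "Warrior III", "Warrior II", "Warrior I",
  "Elite IV", "Elite III", "Elite II", "Elite I",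
  "Master IV", "Master III", "Master II", "Master I",
  "Grandmaster IV", "Grandmaster III", "Grandmaster II", "Grandmaster I",
  "Epic IV", "Epic III", "Epic II", "Epic I",
  "Legend IV", "Legend III", "Legend II", "Legend I"]

def get_rank_name_alt (rank_level : Int) : String :=
  if rank_level < 0 ∨ rank_level > 9999 then "Unranked"
  else if rank_level ≤ 114 then
    -- REGULAR_RANKS[n // 5]; the index is in range here, so pyGet? is some (default never used)
    (PySem.List.pyGet? regularRanks (PySem.Int.floordiv rank_level 5)).getD ""
  else if rank_level ≤ 136 then "Mythic Entry"
  else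
    (if rank_level ≤ 160 then "Mythic"
     else if rank_level ≤ 185 then "Mythic Honor"
     else if rank_level ≤ 235 then "Mythical Glory"
     else "Mythical Immortal")
      ++ " " ++ PySem.Int.toStr (rank_level - 136) ++ " Star"

-- ===== PRECONDITION & SPEC =====
def Spec_get_rank_name (rank_level : Int) (out : String) : Prop := out = get_rank_name_alt rank_level
instance (rank_level : Int) (out : String) : Decidable (Spec_get_rank_name rank_level out) := by unfold Spec_get_rank_name; infer_instance

-- ===== CLAIM (what is proved, stated in full; the proofs are below) =====
def Claim_equal_get_rank_name : Prop := ∀ (rank_level : Int), Dom_get_rank_name rank_level → Spec_get_rank_name rank_level (get_rank_name rank_level)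

-- ===== LEMMAS AND PROOFS =====

-- ===== VERDICT (by name: the statement is the Claim_ definition above) =====
lemma findRank_eval (n : Int) : findRank n rankRanges =
    (if (0:Int) ≤ n ∧ n ≤ 4 then rankLabel n "Warrior III" else (if (5:Int) ≤ n ∧ n ≤ 9 then rankLabel n "Warrior II" else (if (10:Int) ≤ n ∧ n ≤ 14 then rankLabel n "Warrior I" else (if (15:Int) ≤ n ∧ n ≤ 19 then rankLabel n "Elite IV" else (if (20:Int) ≤ n ∧ n ≤ 24 then rankLabel n "Elite III" else (if (25:Int) ≤ n ∧ n ≤ 29 then rankLabel n "Elite II" else (if (30:Int) ≤ n ∧ n ≤ 34 then rankLabel n "Elite I" else (if (35:Int) ≤ n ∧ n ≤ 39 then rankLabel n "Master IV" else (if (40:Int) ≤ n ∧ n ≤ 44 then rankLabel n "Master III" else (if (45:Int) ≤ n ∧ n ≤ 49 then rankLabel n "Master II" else (if (50:Int) ≤ n ∧ n ≤ 54 then rankLabel n "Master I" else (if (55:Int) ≤ n ∧ n ≤ 59 then rankLabel n "Grandmaster IV" else (if (60:Int) ≤ n ∧ n ≤ 64 then rankLabel n "Grandmaster III" else (if (65:Int)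 ≤ n ∧ n ≤ 69 then rankLabel n "Grandmaster II" else (if (70:Int) ≤ n ∧ n ≤ 74 then rankLabel n "Grandmaster I" else (if (75:Int) ≤ n ∧ n ≤ 79 then rankLabel n "Epic IV" else (if (80:Int) ≤ n ∧ n ≤ 84 then rankLabel n "Epic III" else (if (85:Int) ≤ n ∧ n ≤ 89 then rankLabel n "Epic II" else (if (90:Int) ≤ n ∧ n ≤ 94 then rankLabel n "Epic I" else (if (95:Int) ≤ n ∧ n ≤ 99 then rankLabel n "Legend IV" else (if (100:Int) ≤ n ∧ n ≤ 104 then rankLabel n "Legend III" else (if (105:Int) ≤ n ∧ n ≤ 109 then rankLabel n "Legend II" else (if (110:Int) ≤ n ∧ n ≤ 114 then rankLabel n "Legend I" else (if (115:Int) ≤ n ∧ n ≤ 136 then rankLabel n "Mythic Entry" else (if (137:Int) ≤ n ∧ n ≤ 160 then rankLabel n "Mythic" else (if (161:Int) ≤ n ∧ n ≤ 185 then rankLabel n "Mythic Honor" else (if (186:Int) ≤ n ∧ n ≤ 235 then rankLabel n "Mythical Glory" else (if (236:Int) ≤ n ∧ n ≤ 9999 then rankLabel n "Mythical Immortal" else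 "Unranked")))))))))))))))))))))))))))) := rfl

set_option maxHeartbeats 2000000 in
theorem get_rank_name_spec : Claim_equal_get_rank_name := by
  intro n _
  unfold Spec_get_rank_name get_rank_name get_rank_name_alt
  rw [findRank_eval]
  by_cases h0 : (0:Int) ≤ n ∧ n ≤ 4
  · rw [if_pos h0]
    rw [if_neg (show ¬(n < 0 ∨ n > 9999) from by omega)]
    rw [if_pos (show n ≤ 114 from by omega)]
    simp only [rankLabel, String.reduceEq, reduceIte]
    rw [PySem.Int.floordiv_eq_ediv_of_pos (by norm_num), show n / 5 = 0 from by omega]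
    rfl
  · rw [if_neg h0]
    by_cases h1 : (5:Int) ≤ n ∧ n ≤ 9
    · rw [if_pos h1]
      rw [if_neg (show ¬(n < 0 ∨ n > 9999) from by omega)]
      rw [if_pos (show n ≤ 114 from by omega)]
      simp only [rankLabel, String.reduceEq, reduceIte]
      rw [PySem.Int.floordiv_eq_ediv_of_pos (by norm_num), show n / 5 = 1 from by omega]
      rfl
    · rw [if_neg h1]
      by_cases h2 : (10:Int) ≤ n ∧ n ≤ 14
      · rw [if_pos h2]
        rw [if_neg (show ¬(n < 0 ∨ n > 9999) from by omega)]
        rw [if_pos (show n ≤ 114 from by omega)]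
        simp only [rankLabel, String.reduceEq, reduceIte]
        rw [PySem.Int.floordiv_eq_ediv_of_pos (by norm_num), show n / 5 = 2 from by omega]
        rfl
      · rw [if_neg h2]
        by_cases h3 : (15:Int) ≤ n ∧ n ≤ 19
        · rw [if_pos h3]
          rw [if_neg (show ¬(n < 0 ∨ n > 9999) from by omega)]
          rw [if_pos (show n ≤ 114 from by omega)]
          simp only [rankLabel, String.reduceEq, reduceIte]
          rw [PySem.Int.floordiv_eq_ediv_of_pos (by norm_num), show n / 5 = 3 from by omega]
          rfl
        · rw [if_neg h3]
          by_cases h4 : (20:Int) ≤ n ∧ n ≤ 24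
          · rw [if_pos h4]
            rw [if_neg (show ¬(n < 0 ∨ n > 9999) from by omega)]
            rw [if_pos (show n ≤ 114 from by omega)]
            simp only [rankLabel, String.reduceEq, reduceIte]
            rw [PySem.Int.floordiv_eq_ediv_of_pos (by norm_num), show n / 5 = 4 from by omega]
            rfl
          · rw [if_neg h4]
            by_cases h5 : (25:Int) ≤ n ∧ n ≤ 29
            · rw [if_pos h5]
              rw [if_neg (show ¬(n < 0 ∨ n > 9999) from by omega)]
              rw [if_pos (show n ≤ 114 from by omega)]
              simp only [rankLabel, String.reduceEq, reduceIte]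
              rw [PySem.Int.floordiv_eq_ediv_of_pos (by norm_num), show n / 5 = 5 from by omega]
              rfl
            · rw [if_neg h5]
              by_cases h6 : (30:Int) ≤ n ∧ n ≤ 34
              · rw [if_pos h6]
                rw [if_neg (show ¬(n < 0 ∨ n > 9999) from by omega)]
                rw [if_pos (show n ≤ 114 from by omega)]
                simp only [rankLabel, String.reduceEq, reduceIte]
                rw [PySem.Int.floordiv_eq_ediv_of_pos (by norm_num), show n / 5 = 6 from by omega]
                rfl
              · rw [if_neg h6]
                by_cases h7 : (35:Int) ≤ n ∧ n ≤ 39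
                · rw [if_pos h7]
                  rw [if_neg (show ¬(n < 0 ∨ n > 9999) from by omega)]
                  rw [if_pos (show n ≤ 114 from by omega)]
                  simp only [rankLabel, String.reduceEq, reduceIte]
                  rw [PySem.Int.floordiv_eq_ediv_of_pos (by norm_num), show n / 5 = 7 from by omega]
                  rfl
                · rw [if_neg h7]
                  by_cases h8 : (40:Int) ≤ n ∧ n ≤ 44
                  · rw [if_pos h8]
                    rw [if_neg (show ¬(n < 0 ∨ n > 9999) from by omega)]
                    rw [if_pos (show n ≤ 114 from by omega)]
                    simp only [rankLabel, String.reduceEq, reduceIte]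
                    rw [PySem.Int.floordiv_eq_ediv_of_pos (by norm_num), show n / 5 = 8 from by omega]
                    rfl
                  · rw [if_neg h8]
                    by_cases h9 : (45:Int) ≤ n ∧ n ≤ 49
                    · rw [if_pos h9]
                      rw [if_neg (show ¬(n < 0 ∨ n > 9999) from by omega)]
                      rw [if_pos (show n ≤ 114 from by omega)]
                      simp only [rankLabel, String.reduceEq, reduceIte]
                      rw [PySem.Int.floordiv_eq_ediv_of_pos (by norm_num), show n / 5 = 9 from by omega]
                      rfl
                    · rw [if_neg h9]
                      by_cases h10 : (50:Int) ≤ n ∧ n ≤ 54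
                      · rw [if_pos h10]
                        rw [if_neg (show ¬(n < 0 ∨ n > 9999) from by omega)]
                        rw [if_pos (show n ≤ 114 from by omega)]
                        simp only [rankLabel, String.reduceEq, reduceIte]
                        rw [PySem.Int.floordiv_eq_ediv_of_pos (by norm_num), show n / 5 = 10 from by omega]
                        rfl
                      · rw [if_neg h10]
                        by_cases h11 : (55:Int) ≤ n ∧ n ≤ 59
                        · rw [if_pos h11]
                          rw [if_neg (show ¬(n < 0 ∨ n > 9999) from by omega)]
                          rw [if_pos (show n ≤ 114 from by omega)]
                          simp only [rankLabel, String.reduceEq, reduceIte]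
                          rw [PySem.Int.floordiv_eq_ediv_of_pos (by norm_num), show n / 5 = 11 from by omega]
                          rfl
                        · rw [if_neg h11]
                          by_cases h12 : (60:Int) ≤ n ∧ n ≤ 64
                          · rw [if_pos h12]
                            rw [if_neg (show ¬(n < 0 ∨ n > 9999) from by omega)]
                            rw [if_pos (show n ≤ 114 from by omega)]
                            simp only [rankLabel, String.reduceEq, reduceIte]
                            rw [PySem.Int.floordiv_eq_ediv_of_pos (by norm_num), show n / 5 = 12 from by omega]
                            rfl
                          · rw [if_neg h12]
                            by_cases h13 : (65:Int) ≤ n ∧ n ≤ 69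
                            · rw [if_pos h13]
                              rw [if_neg (show ¬(n < 0 ∨ n > 9999) from by omega)]
                              rw [if_pos (show n ≤ 114 from by omega)]
                              simp only [rankLabel, String.reduceEq, reduceIte]
                              rw [PySem.Int.floordiv_eq_ediv_of_pos (by norm_num), show n / 5 = 13 from by omega]
                              rfl
                            · rw [if_neg h13]
                              by_cases h14 : (70:Int) ≤ n ∧ n ≤ 74
                              · rw [if_pos h14]
                                rw [if_neg (show ¬(n < 0 ∨ n > 9999) from by omega)]
                                rw [if_pos (show n ≤ 114 from by omega)]
                                simp only [rankLabel, String.reduceEq, reduceIte]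
                                rw [PySem.Int.floordiv_eq_ediv_of_pos (by norm_num), show n / 5 = 14 from by omega]
                                rfl
                              · rw [if_neg h14]
                                by_cases h15 : (75:Int) ≤ n ∧ n ≤ 79
                                · rw [if_pos h15]
                                  rw [if_neg (show ¬(n < 0 ∨ n > 9999) from by omega)]
                                  rw [if_pos (show n ≤ 114 from by omega)]
                                  simp only [rankLabel, String.reduceEq, reduceIte]
                                  rw [PySem.Int.floordiv_eq_ediv_of_pos (by norm_num), show n / 5 = 15 from by omega]
                                  rfl
                                · rw [if_neg h15]
                                  by_cases h16 : (80:Int) ≤ n ∧ n ≤ 84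
                                  · rw [if_pos h16]
                                    rw [if_neg (show ¬(n < 0 ∨ n > 9999) from by omega)]
                                    rw [if_pos (show n ≤ 114 from by omega)]
                                    simp only [rankLabel, String.reduceEq, reduceIte]
                                    rw [PySem.Int.floordiv_eq_ediv_of_pos (by norm_num), show n / 5 = 16 from by omega]
                                    rfl
                                  · rw [if_neg h16]
                                    by_cases h17 : (85:Int) ≤ n ∧ n ≤ 89
                                    · rw [if_pos h17]
                                      rw [if_neg (show ¬(n < 0 ∨ n > 9999) from by omega)]
                                      rw [if_pos (show n ≤ 114 from by omega)]
                                      simp only [rankLabel, String.reduceEq, reduceIte]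
                                      rw [PySem.Int.floordiv_eq_ediv_of_pos (by norm_num), show n / 5 = 17 from by omega]
                                      rfl
                                    · rw [if_neg h17]
                                      by_cases h18 : (90:Int) ≤ n ∧ n ≤ 94
                                      · rw [if_pos h18]
                                        rw [if_neg (show ¬(n < 0 ∨ n > 9999) from by omega)]
                                        rw [if_pos (show n ≤ 114 from by omega)]
                                        simp only [rankLabel, String.reduceEq, reduceIte]
                                        rw [PySem.Int.floordiv_eq_ediv_of_pos (by norm_num), show n / 5 = 18 from by omega]
                                        rfl
                                      · rw [if_neg h18]
                                        by_cases h19 : (95:Int) ≤ n ∧ n ≤ 99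
                                        · rw [if_pos h19]
                                          rw [if_neg (show ¬(n < 0 ∨ n > 9999) from by omega)]
                                          rw [if_pos (show n ≤ 114 from by omega)]
                                          simp only [rankLabel, String.reduceEq, reduceIte]
                                          rw [PySem.Int.floordiv_eq_ediv_of_pos (by norm_num), show n / 5 = 19 from by omega]
                                          rfl
                                        · rw [if_neg h19]
                                          by_cases h20 : (100:Int) ≤ n ∧ n ≤ 104
                                          · rw [if_pos h20]
                                            rw [if_neg (show ¬(n < 0 ∨ n > 9999) from by omega)]
                                            rw [if_pos (show n ≤ 114 from by omega)]
                                            simp only [rankLabel, String.reduceEq, reduceIte]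
                                            rw [PySem.Int.floordiv_eq_ediv_of_pos (by norm_num), show n / 5 = 20 from by omega]
                                            rfl
                                          · rw [if_neg h20]
                                            by_cases h21 : (105:Int) ≤ n ∧ n ≤ 109
                                            · rw [if_pos h21]
                                              rw [if_neg (show ¬(n < 0 ∨ n > 9999) from by omega)]
                                              rw [if_pos (show n ≤ 114 from by omega)]
                                              simp only [rankLabel, String.reduceEq, reduceIte]
                                              rw [PySem.Int.floordiv_eq_ediv_of_pos (by norm_num), show n / 5 = 21 from by omega]
                                              rfl
                                            · rw [if_neg h21]
                                              by_cases h22 : (110:Int) ≤ n ∧ n ≤ 114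
                                              · rw [if_pos h22]
                                                rw [if_neg (show ¬(n < 0 ∨ n > 9999) from by omega)]
                                                rw [if_pos (show n ≤ 114 from by omega)]
                                                simp only [rankLabel, String.reduceEq, reduceIte]
                                                rw [PySem.Int.floordiv_eq_ediv_of_pos (by norm_num), show n / 5 = 22 from by omega]
                                                rfl
                                              · rw [if_neg h22]
                                                by_cases h23 : (115:Int) ≤ n ∧ n ≤ 136
                                                · rw [if_pos h23]
                                                  rw [if_neg (show ¬(n < 0 ∨ n > 9999) from by omega)]
                                                  rw [if_neg (show ¬(n ≤ 114) from by omega), if_pos (show n ≤ 136 from by omega)]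
                                                  simp only [rankLabel, String.reduceEq, reduceIte]
                                                · rw [if_neg h23]
                                                  by_cases h24 : (137:Int) ≤ n ∧ n ≤ 160
                                                  · rw [if_pos h24]
                                                    rw [if_neg (show ¬(n < 0 ∨ n > 9999) from by omega)]
                                                    rw [if_neg (show ¬(n ≤ 114) from by omega), if_neg (show ¬(n ≤ 136) from by omega)]
                                                    rw [if_pos (show n ≤ 160 from by omega)]
                                                    simp only [rankLabel, String.reduceEq, reduceIte]
                                                    rfl
                                                  · rw [if_neg h24]
                                                    by_cases h25 : (161:Int) ≤ n ∧ n ≤ 185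
                                                    · rw [if_pos h25]
                                                      rw [if_neg (show ¬(n < 0 ∨ n > 9999) from by omega)]
                                                      rw [if_neg (show ¬(n ≤ 114) from by omega), if_neg (show ¬(n ≤ 136) from by omega)]
                                                      rw [if_neg (show ¬(n ≤ 160) from by omega), if_pos (show n ≤ 185 from by omega)]
                                                      simp only [rankLabel, String.reduceEq, reduceIte]
                                                      rw [show (n - 160) + 24 = n - 136 from by omega]
                                                      rfl
                                                    · rw [if_neg h25]
                                                      by_cases h26 : (186:Int) ≤ n ∧ n ≤ 235
                                                      · rw [if_pos h26]
                                                        rw [if_neg (show ¬(n < 0 ∨ n > 9999) from by omega)]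
                                                        rw [if_neg (show ¬(n ≤ 114) from by omega), if_neg (show ¬(n ≤ 136) from by omega)]
                                                        rw [if_neg (show ¬(n ≤ 160) from by omega), if_neg (show ¬(n ≤ 185) from by omega), if_pos (show n ≤ 235 from by omega)]
                                                        simp only [rankLabel, String.reduceEq, reduceIte]
                                                        rw [show (n - 185) + 49 = n - 136 from by omega]
                                                        rfl
                                                      · rw [if_neg h26]
                                                        by_cases h27 : (236:Int) ≤ n ∧ n ≤ 9999
                                                        · rw [if_pos h27]
                                                          rw [if_neg (show ¬(n < 0 ∨ n > 9999) from by omega)]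
                                                          rw [if_neg (show ¬(n ≤ 114) from by omega), if_neg (show ¬(n ≤ 136) from by omega)]
                                                          rw [if_neg (show ¬(n ≤ 160) from by omega), if_neg (show ¬(n ≤ 185) from by omega), if_neg (show ¬(n ≤ 235) from by omega)]
                                                          simp only [rankLabel, String.reduceEq, reduceIte]
                                                          rw [show (n - 235) + 99 = n - 136 from by omega]
                                                          rfl
                                                        · rw [if_neg h27]
                                                          rw [if_pos (show n < 0 ∨ n > 9999 from by omega)]
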